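-- pv_equiv track=rewrite | github.com/chengxinlun/se-finder | fe_handler_exp.py | flux_sum
-- ===== SOURCE A (Python) =====
-- def flux_sum(part, wave, flux):
--     sum_flux = 0
--     for each in part:
--         for i in range(len(wave)):
--             if wave[i] < each[0]:
--                 continue
--             if wave[i] > each[1]:
--                 break
--             sum_flux = sum_flux + flux[i]
--     return sum_flux
-- ===== SOURCE B (Python) =====
-- def flux_sum(part, wave, flux):
--     # Single pass over wave maintaining the set of still-active intervals;
--     # each interval is dropped at its break point (w >= lo and w > hi).
--     alive = list(part)
--     total = 0
--     for i, w in enumerate(wave):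
--         if not alive:
--             break
--         c = 0
--         nxt = []
--         for lo, hi in alive:
--             if w >= lo and w > hi:
--                 continue
--             nxt.append((lo, hi))
--             if lo <= w <= hi:
--                 c += 1
--         alive = nxt
--         if c:
--             total += c * flux[i]
--     return total
-- ===== Notes on version B (the rewrite author's own statement) =====
-- stated objective: alternative
-- what changed: Swapped the loop nesting: instead of rescanning wave for every interval, B makes a single pass over wave maintaining the list of still-active intervals (each interval is dropped at its break point, w >= lo and w > hi), counting how many active intervals contain each sample and adding count*flux[i]; it stops early once every interval is dead.
import Mathlib
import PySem

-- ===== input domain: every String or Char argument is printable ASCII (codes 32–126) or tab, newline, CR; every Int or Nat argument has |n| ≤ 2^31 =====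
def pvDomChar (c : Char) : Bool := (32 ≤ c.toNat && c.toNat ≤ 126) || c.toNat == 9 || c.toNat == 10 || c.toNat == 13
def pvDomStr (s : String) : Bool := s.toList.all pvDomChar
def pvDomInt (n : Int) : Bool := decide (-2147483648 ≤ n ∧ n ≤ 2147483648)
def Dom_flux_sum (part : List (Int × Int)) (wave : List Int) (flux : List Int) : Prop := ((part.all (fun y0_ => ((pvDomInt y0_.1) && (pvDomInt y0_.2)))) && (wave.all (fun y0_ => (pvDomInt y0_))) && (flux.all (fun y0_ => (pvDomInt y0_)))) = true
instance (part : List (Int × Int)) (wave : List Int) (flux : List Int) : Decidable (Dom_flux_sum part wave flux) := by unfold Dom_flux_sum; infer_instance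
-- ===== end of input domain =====

-- B swaps the loop nesting: one pass over wave maintaining the still-active intervals (alternative, not claimed faster).


-- ===== PORT A =====
-- inner 'for i in range(len(wave))' loop with continue/break; flux[i] is ported as
-- flux.getD i 0 (i : Nat, i ≥ 0): exact wherever i < flux.length, which Pre_ guarantees
-- for every index that is actually touched (Python raises IndexError otherwise).
def fluxInnerA (lo hi : Int) (wave flux : List Int) (i : Nat) (s : Int) : Int :=
  if h : i < wave.length then
    if wave[i] < lo then fluxInnerA lo hi wave flux (i + 1) s
    else if hi < wave[i] then s
    else fluxInnerA lo hi wave flux (i + 1) (s + flux.getD i 0)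
  else s
termination_by wave.length - i

def flux_sum (part : List (Int × Int)) (wave : List Int) (flux : List Int) : Int :=
  part.foldl (fun s p => fluxInnerA p.1 p.2 wave flux 0 s) 0

-- ===== PORT B =====
-- inner 'for lo, hi in alive' loop: returns (surviving intervals, count of matches)
def fluxScanAlive (w : Int) : List (Int × Int) → List (Int × Int) × Int
  | [] => ([], 0)
  | p :: rest =>
    let r := fluxScanAlive w rest
    if p.1 ≤ w ∧ p.2 < w then r
    else (p :: r.1, if p.1 ≤ w ∧ w ≤ p.2 then r.2 + 1 else r.2)

-- outer 'for i, w in enumerate(wave)' loop with early break when alive is empty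
def fluxAltLoop (flux : List Int) : List Int → Nat → List (Int × Int) → Int → Int
  | [], _, _, total => total
  | w :: rest, i, alive, total =>
    if alive.isEmpty then total
    else
      let r := fluxScanAlive w alive
      fluxAltLoop flux rest (i + 1) r.1
        (if r.2 ≠ 0 then total + r.2 * flux.getD i 0 else total)

def flux_sum_alt (part : List (Int × Int)) (wave : List Int) (flux : List Int) : Int :=
  fluxAltLoop flux wave 0 part 0

-- ===== PRECONDITION & SPEC =====
-- Pre_ excludes exactly the inputs on which Python A raises IndexError: some interval
-- reaches a wave index i (in [lo,hi], no earlier break) with i ≥ len(flux).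
def Pre_flux_sum (part : List (Int × Int)) (wave : List Int) (flux : List Int) : Prop :=
  ∀ p ∈ part, ∀ i < wave.length,
    (p.1 ≤ wave.getD i 0 ∧ wave.getD i 0 ≤ p.2 ∧
      ∀ j < i, ¬(p.1 ≤ wave.getD j 0 ∧ p.2 < wave.getD j 0)) → i < flux.length
instance (part : List (Int × Int)) (wave : List Int) (flux : List Int) : Decidable (Pre_flux_sum part wave flux) := by unfold Pre_flux_sum; infer_instance

def pvWitness_flux_sum : (List (Int × Int)) × List Int × List Int :=
  ([(1, 3), (2, 5)], [1, 2, 4, 6], [10, 20, 30, 40])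

def Spec_flux_sum (part : List (Int × Int)) (wave : List Int) (flux : List Int) (out : Int) : Prop := out = flux_sum_alt part wave flux
instance (part : List (Int × Int)) (wave : List Int) (flux : List Int) (out : Int) : Decidable (Spec_flux_sum part wave flux out) := by unfold Spec_flux_sum; infer_instance

-- ===== CLAIM (what is proved, stated in full; the proofs are below) =====
def Claim_equal_flux_sum : Prop := ∀ (part : List (Int × Int)) (wave : List Int) (flux : List Int), Dom_flux_sum part wave flux → Pre_flux_sum part wave flux → Spec_flux_sum part wave flux (flux_sum part wave flux)

-- ===== LEMMAS AND PROOFS =====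

-- the canonical per-interval contribution sum (proof-only helper)
def fluxContrib (wave flux : List Int) (k : Nat) (L : List (Int × Int)) : Int :=
  (L.map (fun p => fluxInnerA p.1 p.2 wave flux k 0)).sum

-- A's inner loop only adds to its accumulator
theorem fluxInnerA_shift (lo hi : Int) (wave flux : List Int) (i : Nat) (s : Int) :
    fluxInnerA lo hi wave flux i s = s + fluxInnerA lo hi wave flux i 0 := by
  have key : ∀ (n i : Nat) (s : Int), wave.length - i ≤ n →
      fluxInnerA lo hi wave flux i s = s + fluxInnerA lo hi wave flux i 0 := by
    intro n
    induction n with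
    | zero =>
      intro i s h
      have hni : ¬ i < wave.length := by omega
      conv_lhs => rw [fluxInnerA]
      conv_rhs => rw [fluxInnerA]
      simp [hni]
    | succ n ih =>
      intro i s h
      conv_lhs => rw [fluxInnerA]
      conv_rhs => rw [fluxInnerA]
      by_cases hiw : i < wave.length
      · simp only [hiw, dif_pos]
        by_cases h1 : wave[i] < lo
        · simp only [h1, if_pos]
          rw [ih (i + 1) s (by omega)]
        · simp only [h1, if_neg, not_false_iff]
          by_cases h2 : hi < wave[i]
          · simp [h2]
          · simp only [h2, if_neg, not_false_iff]
            rw [ih (i + 1) (s + flux.getD i 0) (by omega),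
                ih (i + 1) (0 + flux.getD i 0) (by omega)]
            ring
      · simp [hiw]
  exact key (wave.length - i) i s le_rfl

-- one step of A's inner loop, expressed on the accumulator-free form
theorem fluxInnerA_step (lo hi : Int) (wave flux : List Int) (i : Nat) (h : i < wave.length) :
    fluxInnerA lo hi wave flux i 0 =
      if lo ≤ wave[i] ∧ hi < wave[i] then 0
      else (if lo ≤ wave[i] ∧ wave[i] ≤ hi then flux.getD i 0 else 0) +
             fluxInnerA lo hi wave flux (i + 1) 0 := by
  rw [fluxInnerA]
  simp only [h, dif_pos]
  by_cases h1 : wave[i] < lo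
  · have hb : ¬ (lo ≤ wave[i] ∧ hi < wave[i]) := by omega
    have hc : ¬ (lo ≤ wave[i] ∧ wave[i] ≤ hi) := by omega
    rw [if_pos h1, if_neg hb, if_neg hc]
    ring
  · by_cases h2 : hi < wave[i]
    · have hb : lo ≤ wave[i] ∧ hi < wave[i] := by omega
      rw [if_neg h1, if_pos h2, if_pos hb]
    · have hb : ¬ (lo ≤ wave[i] ∧ hi < wave[i]) := by omega
      have hc : lo ≤ wave[i] ∧ wave[i] ≤ hi := by omega
      rw [if_neg h1, if_neg h2, if_neg hb, if_pos hc]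
      rw [fluxInnerA_shift lo hi wave flux (i + 1) (0 + flux.getD i 0)]
      ring

theorem fluxInnerA_oob (lo hi : Int) (wave flux : List Int) (i : Nat)
    (h : wave.length ≤ i) : fluxInnerA lo hi wave flux i 0 = 0 := by
  rw [fluxInnerA]
  have hni : ¬ i < wave.length := by omega
  simp [hni]

theorem fluxContrib_cons (wave flux : List Int) (k : Nat) (p : Int × Int)
    (L : List (Int × Int)) :
    fluxContrib wave flux k (p :: L) =
      fluxInnerA p.1 p.2 wave flux k 0 + fluxContrib wave flux k L := by
  simp [fluxContrib]

theorem fluxContrib_oob (wave flux : List Int) (k : Nat) (h : wave.length ≤ k)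
    (L : List (Int × Int)) : fluxContrib wave flux k L = 0 := by
  induction L with
  | nil => simp [fluxContrib]
  | cons p rest ih =>
    rw [fluxContrib_cons, fluxInnerA_oob _ _ _ _ _ h, ih]
    ring

theorem fluxScanAlive_cons (w : Int) (p : Int × Int) (rest : List (Int × Int)) :
    fluxScanAlive w (p :: rest) =
      if p.1 ≤ w ∧ p.2 < w then fluxScanAlive w rest
      else (p :: (fluxScanAlive w rest).1,
            if p.1 ≤ w ∧ w ≤ p.2 then (fluxScanAlive w rest).2 + 1
            else (fluxScanAlive w rest).2) := by
  rw [fluxScanAlive]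

-- one wave sample distributes over the interval list exactly as fluxScanAlive does
theorem fluxContrib_step (wave flux : List Int) (k : Nat) (h : k < wave.length)
    (L : List (Int × Int)) :
    fluxContrib wave flux k L =
      (fluxScanAlive wave[k] L).2 * flux.getD k 0 +
        fluxContrib wave flux (k + 1) (fluxScanAlive wave[k] L).1 := by
  induction L with
  | nil => simp [fluxContrib, fluxScanAlive]
  | cons p rest ih =>
    rw [fluxContrib_cons, fluxInnerA_step p.1 p.2 wave flux k h, fluxScanAlive_cons]
    by_cases hb : p.1 ≤ wave[k] ∧ p.2 < wave[k]
    · rw [if_pos hb, if_pos hb, ih]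
      ring
    · rw [if_neg hb, if_neg hb]
      dsimp only
      by_cases hc : p.1 ≤ wave[k] ∧ wave[k] ≤ p.2
      · rw [if_pos hc, if_pos hc, fluxContrib_cons, ih]
        ring
      · rw [if_neg hc, if_neg hc, fluxContrib_cons, ih]
        ring

-- B's outer loop computes the accumulated contribution sum
theorem fluxAltLoop_eq (wave flux : List Int) :
    ∀ (ws : List Int) (k : Nat) (L : List (Int × Int)) (t : Int),
      wave.drop k = ws → fluxAltLoop flux ws k L t = t + fluxContrib wave flux k L := by
  intro ws
  induction ws with
  | nil =>
    intro k L t hd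
    have hk : wave.length ≤ k := by
      have := congrArg List.length hd
      simp [List.length_drop] at this
      omega
    rw [fluxAltLoop, fluxContrib_oob wave flux k hk]
    ring
  | cons w rest ih =>
    intro k L t hd
    have hk : k < wave.length := by
      have := congrArg List.length hd
      simp [List.length_drop] at this
      omega
    have hdec := List.drop_eq_getElem_cons hk
    rw [hd] at hdec
    obtain ⟨hw, hrest'⟩ := List.cons_eq_cons.mp hdec
    have hrest : wave.drop (k + 1) = rest := hrest'.symm
    rw [fluxAltLoop]
    by_cases hL : L.isEmpty
    · have hLnil : L = [] := List.isEmpty_iff.mp hL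
      subst hLnil
      simp [fluxContrib]
    · rw [if_neg hL]
      dsimp only
      rw [hw, ih (k + 1) _ _ hrest, fluxContrib_step wave flux k hk L]
      by_cases hc : (fluxScanAlive wave[k] L).2 = 0
      · rw [if_neg (fun hne => hne hc), hc]
        ring
      · rw [if_pos hc]
        ring

-- A's outer fold accumulates exactly the contribution sum
theorem flux_foldl_eq (wave flux : List Int) :
    ∀ (L : List (Int × Int)) (s : Int),
      List.foldl (fun s p => fluxInnerA p.1 p.2 wave flux 0 s) s L =
        s + fluxContrib wave flux 0 L := by
  intro L
  induction L with
  | nil => intro s; simp [fluxContrib]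
  | cons p rest ih =>
    intro s
    rw [List.foldl_cons]
    rw [ih, fluxContrib_cons, fluxInnerA_shift p.1 p.2 wave flux 0 s]
    ring

-- ===== VERDICT (by name: the statement is the Claim_ definition above) =====
theorem flux_sum_spec : Claim_equal_flux_sum := by
  intro part wave flux _ _
  unfold Spec_flux_sum flux_sum flux_sum_alt
  rw [flux_foldl_eq wave flux part 0, fluxAltLoop_eq wave flux wave 0 part 0 (by simp)]
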